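-- pv_equiv track=rewrite | github.com/VisageDvachevsky/AI-Devtools-Hack- | backend/services/job_description_generator.py | _generate_requirements
-- ===== SOURCE A (Python) =====
-- from typing import Dict, List, Optional
--
-- def _generate_requirements(
--
--     skills: List[str],
--     exp_info: Dict,
--     market_data: Optional[Dict]
-- ) -> List[str]:
--     """Generate job requirements"""
--
--     requirements = []
--
--     # Experience requirement
--     requirements.append(f"{exp_info['years']} years of professional software development experience")
--
--     # Technical skills
--     if skills:
--         # Group by type
--         languages = [s for s in skills if s.lower() in ["python", "javascript", "java", "go", "rust", "typescript"]]
--         frameworks = [s for s in skills if s.lower() in ["react", "vue", "angular", "django", "flask", "fastapi"]]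
--         tools = [s for s in skills if s.lower() in ["docker", "kubernetes", "aws", "postgresql", "redis"]]
--
--         if languages:
--             requirements.append(f"Strong proficiency in {', '.join(languages[:2])}")
--
--         if frameworks:
--             requirements.append(f"Hands-on experience with {', '.join(frameworks[:2])}")
--
--         if tools:
--             requirements.append(f"Familiarity with {', '.join(tools[:3])}")
--
--     # Soft skills
--     requirements.extend([
--         "Excellent problem-solving and analytical skills",
--         "Strong communication and collaboration abilities",
--         "Self-motivated with ability to work independently",
--         "Passion for writing clean, efficient code"
--     ])
--
--     # Education
--     requirements.append("Bachelor's degree in Computer Science or equivalent experience")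
--
--     return requirements
-- ===== SOURCE B (Python) =====
-- _CLS = {
--     "python": "language", "javascript": "language", "java": "language",
--     "go": "language", "rust": "language", "typescript": "language",
--     "react": "framework", "vue": "framework", "angular": "framework",
--     "django": "framework", "flask": "framework", "fastapi": "framework",
--     "docker": "tool", "kubernetes": "tool", "aws": "tool",
--     "postgresql": "tool", "redis": "tool",
-- }
--
--
-- def _generate_requirements(skills, exp_info, market_data):
--     reqs = [f"{exp_info['years']} years of professional software development experience"]
--
--     languages, frameworks, tools = [], [], []
--     buckets = {"language": languages, "framework": frameworks, "tool": tools}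
--     for s in skills:
--         cat = _CLS.get(s.lower())
--         if cat is not None:
--             buckets[cat].append(s)
--
--     if languages:
--         reqs.append("Strong proficiency in " + ", ".join(languages[:2]))
--     if frameworks:
--         reqs.append("Hands-on experience with " + ", ".join(frameworks[:2]))
--     if tools:
--         reqs.append("Familiarity with " + ", ".join(tools[:3]))
--
--     reqs += [
--         "Excellent problem-solving and analytical skills",
--         "Strong communication and collaboration abilities",
--         "Self-motivated with ability to work independently",
--         "Passion for writing clean, efficient code",
--     ]
--     reqs.append("Bachelor's degree in Computer Science or equivalent experience")
--     return reqs
-- ===== Notes on version B (the rewrite author's own statement) =====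
-- stated objective: idiomatic
-- what changed: Replaces the three separate list-comprehension scans of skills with one classification dict and a single pass that dispatches each skill into its category bucket (the redundant 'if skills' guard also disappears).
import Mathlib
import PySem

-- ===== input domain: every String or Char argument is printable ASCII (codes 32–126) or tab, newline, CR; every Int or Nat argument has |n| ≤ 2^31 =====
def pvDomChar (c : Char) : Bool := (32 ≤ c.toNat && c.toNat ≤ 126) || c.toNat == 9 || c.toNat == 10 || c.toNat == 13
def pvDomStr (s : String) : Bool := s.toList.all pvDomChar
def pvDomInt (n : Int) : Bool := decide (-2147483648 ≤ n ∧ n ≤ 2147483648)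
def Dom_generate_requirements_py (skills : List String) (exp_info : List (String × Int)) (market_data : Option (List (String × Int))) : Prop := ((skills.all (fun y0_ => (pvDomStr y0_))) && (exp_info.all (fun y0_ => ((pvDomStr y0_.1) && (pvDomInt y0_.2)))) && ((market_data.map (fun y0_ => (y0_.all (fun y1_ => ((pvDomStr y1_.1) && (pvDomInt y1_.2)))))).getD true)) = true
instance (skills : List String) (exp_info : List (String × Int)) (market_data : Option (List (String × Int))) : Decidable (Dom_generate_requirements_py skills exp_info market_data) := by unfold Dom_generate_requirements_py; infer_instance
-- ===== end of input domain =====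

-- B replaces A's three separate comprehension scans of `skills` by one classification
-- table and a single dispatching pass (objective: idiomatic); return values are equal.

-- ===== PORT A =====
def pvLangsA : List String := ["python", "javascript", "java", "go", "rust", "typescript"]
def pvFrameworksA : List String := ["react", "vue", "angular", "django", "flask", "fastapi"]
def pvToolsA : List String := ["docker", "kubernetes", "aws", "postgresql", "redis"]
def pvSoftA : List String :=
  ["Excellent problem-solving and analytical skills",
   "Strong communication and collaboration abilities",
   "Self-motivated with ability to work independently",
   "Passion for writing clean, efficient code"]

def generate_requirements_py (skills : List String) (exp_info : List (String × Int)) (market_data : Option (List (String × Int))) : List String :=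
  match (PySem.Dict.mk exp_info).get? "years" with
  | none => []  -- Python raises KeyError here; excluded by Pre_
  | some years =>
    let requirements : List String := [PySem.Int.toStr years ++ " years of professional software development experience"]
    let requirements :=
      if skills.isEmpty then requirements else
        let languages := skills.filter (fun s => pvLangsA.contains (PySem.Str.lower s))
        let frameworks := skills.filter (fun s => pvFrameworksA.contains (PySem.Str.lower s))
        let tools := skills.filter (fun s => pvToolsA.contains (PySem.Str.lower s))
        let requirements := if languages.isEmpty then requirements else requirements ++ ["Strong proficiency in " ++ PySem.Str.join ", " (languages.take 2)]
        let requirements := if frameworks.isEmpty then requirements else requirements ++ ["Hands-on experience with " ++ PySem.Str.join ", " (frameworks.take 2)]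
        if tools.isEmpty then requirements else requirements ++ ["Familiarity with " ++ PySem.Str.join ", " (tools.take 3)]
    requirements ++ pvSoftA ++ ["Bachelor's degree in Computer Science or equivalent experience"]

-- ===== PORT B =====
def pvCls : List (String × String) :=
  [("python", "language"), ("javascript", "language"), ("java", "language"),
   ("go", "language"), ("rust", "language"), ("typescript", "language"),
   ("react", "framework"), ("vue", "framework"), ("angular", "framework"),
   ("django", "framework"), ("flask", "framework"), ("fastapi", "framework"),
   ("docker", "tool"), ("kubernetes", "tool"), ("aws", "tool"),
   ("postgresql", "tool"), ("redis", "tool")]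

def pvSoftB : List String :=
  ["Excellent problem-solving and analytical skills",
   "Strong communication and collaboration abilities",
   "Self-motivated with ability to work independently",
   "Passion for writing clean, efficient code"]

def pvClassify (acc : List String × List String × List String) (s : String) : List String × List String × List String :=
  match List.lookup (PySem.Str.lower s) pvCls with
  | some "language" => (acc.1 ++ [s], acc.2.1, acc.2.2)
  | some "framework" => (acc.1, acc.2.1 ++ [s], acc.2.2)
  | some "tool" => (acc.1, acc.2.1, acc.2.2 ++ [s])
  | _ => acc

def generate_requirements_py_alt (skills : List String) (exp_info : List (String × Int)) (market_data : Option (List (String × Int))) : List String :=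
  match (PySem.Dict.mk exp_info).get? "years" with
  | none => []  -- Python raises KeyError here; excluded by Pre_
  | some years =>
    let reqs : List String := [PySem.Int.toStr years ++ " years of professional software development experience"]
    let buckets := skills.foldl pvClassify ([], [], [])
    let reqs := if buckets.1.isEmpty then reqs else reqs ++ ["Strong proficiency in " ++ PySem.Str.join ", " (buckets.1.take 2)]
    let reqs := if buckets.2.1.isEmpty then reqs else reqs ++ ["Hands-on experience with " ++ PySem.Str.join ", " (buckets.2.1.take 2)]
    let reqs := if buckets.2.2.isEmpty then reqs else reqs ++ ["Familiarity with " ++ PySem.Str.join ", " (buckets.2.2.take 3)]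
    reqs ++ pvSoftB ++ ["Bachelor's degree in Computer Science or equivalent experience"]

-- ===== PRECONDITION & SPEC =====
-- Pre_ excludes exactly the inputs where exp_info lacks the key "years": A raises KeyError there.
def Pre_generate_requirements_py (skills : List String) (exp_info : List (String × Int)) (market_data : Option (List (String × Int))) : Prop :=
  "years" ∈ exp_info.map Prod.fst
instance (skills : List String) (exp_info : List (String × Int)) (market_data : Option (List (String × Int))) : Decidable (Pre_generate_requirements_py skills exp_info market_data) := by unfold Pre_generate_requirements_py; infer_instance
def pvWitness_generate_requirements_py : List String × (List (String × Int)) × (Option (List (String × Int))) :=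
  (["Python", "React", "docker"], [("years", 3)], none)

def Spec_generate_requirements_py (skills : List String) (exp_info : List (String × Int)) (market_data : Option (List (String × Int))) (out : List String) : Prop := out = generate_requirements_py_alt skills exp_info market_data
instance (skills : List String) (exp_info : List (String × Int)) (market_data : Option (List (String × Int))) (out : List String) : Decidable (Spec_generate_requirements_py skills exp_info market_data out) := by unfold Spec_generate_requirements_py; infer_instance

-- ===== CLAIM (what is proved, stated in full; the proofs are below) =====
def Claim_equal_generate_requirements_py : Prop := ∀ (skills : List String) (exp_info : List (String × Int)) (market_data : Option (List (String × Int))), Dom_generate_requirements_py skills exp_info market_data → Pre_generate_requirements_py skills exp_info market_data → Spec_generate_requirements_py skills exp_info market_data (generate_requirements_py skills exp_info market_data)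

-- ===== LEMMAS AND PROOFS =====

-- one classification step = one element of each of A's three filters
lemma pvClassify_step (acc : List String × List String × List String) (s : String) :
    pvClassify acc s =
      (acc.1 ++ (if pvLangsA.contains (PySem.Str.lower s) then [s] else []),
       acc.2.1 ++ (if pvFrameworksA.contains (PySem.Str.lower s) then [s] else []),
       acc.2.2 ++ (if pvToolsA.contains (PySem.Str.lower s) then [s] else [])) := by
  unfold pvClassify
  generalize PySem.Str.lower s = t
  by_cases hmem : t ∈ (pvCls.map Prod.fst)
  · simp only [pvCls, List.map] at hmem
    fin_cases hmem <;> simp [pvCls, pvLangsA, pvFrameworksA, pvToolsA, List.lookup]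
  · simp only [pvCls, List.map, List.mem_cons, List.not_mem_nil, or_false, not_or] at hmem
    obtain ⟨h1, h2, h3, h4, h5, h6, h7, h8, h9, h10, h11, h12, h13, h14, h15, h16, h17⟩ := hmem
    simp [pvCls, pvLangsA, pvFrameworksA, pvToolsA, List.lookup, beq_eq_decide,
          h1, h2, h3, h4, h5, h6, h7, h8, h9, h10, h11, h12, h13, h14, h15, h16, h17]

lemma pvClassify_foldl (skills : List String) (l f t : List String) :
    skills.foldl pvClassify (l, f, t) =
      (l ++ skills.filter (fun s => pvLangsA.contains (PySem.Str.lower s)),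
       f ++ skills.filter (fun s => pvFrameworksA.contains (PySem.Str.lower s)),
       t ++ skills.filter (fun s => pvToolsA.contains (PySem.Str.lower s))) := by
  induction skills generalizing l f t with
  | nil => simp
  | cons s ss ih =>
    simp only [List.foldl_cons, pvClassify_step, List.filter_cons]
    rw [ih]
    split_ifs <;> simp

-- ===== VERDICT (by name: the statement is the Claim_ definition above) =====
theorem generate_requirements_py_spec : Claim_equal_generate_requirements_py := by
  intro skills exp_info market_data _ _
  unfold Spec_generate_requirements_py generate_requirements_py generate_requirements_py_alt
  cases (PySem.Dict.mk exp_info).get? "years" with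
  | none => rfl
  | some years =>
    simp only [pvClassify_foldl, List.nil_append]
    cases skills with
    | nil => simp [pvSoftA, pvSoftB]
    | cons s ss => simp [pvSoftA, pvSoftB]
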